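-- pv_equiv track=rewrite | github.com/enriquealexandre/ComunicacionesDigitalesOpt | 2_CodificadoresCanal/Práctica/CodCanal.py | paridad_dec
-- ===== SOURCE A (Python) =====
-- def paridad_dec(bits_in,n):
--     x = [int(k) for k in bits_in]
--     y = []
--     erroresDetectados = 0
--     for i in range(0,len(x),n):
--         if sum(x[i:i+n])%2 != 0:
--             erroresDetectados += 1
--         y += x[i:i+n-1]
--     bits_out = "".join([str(k) for k in y])
--     return erroresDetectados, bits_out
-- ===== SOURCE B (Python) =====
-- def paridad_dec(bits_in, n):
--     errores = 0
--     s = 0          # running sum of the current block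
--     c = 0          # position inside the current block
--     out = []
--     for ch in bits_in:
--         b = int(ch)
--         if c != n - 1:          # keep every bit except the parity position
--             out.append(ch)
--         s += b
--         c += 1
--         if c == n:              # block boundary: test parity, reset
--             if s % 2:
--                 errores += 1
--             s = 0
--             c = 0
--     if c > 0 and s % 2:         # flush a trailing partial block
--         errores += 1
--     return errores, "".join(out)
-- ===== Notes on version B (the rewrite author's own statement) =====
-- stated objective: simpler
-- what changed: Replaced the block-slicing loop over range(0,len,n) (with per-block list slices and a join over re-stringified ints) by a single streaming pass over the characters that maintains a running block sum and a position-in-block counter, testing parity at each block boundary and flushing a trailing partial block.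
-- outside the precondition, e.g. on paridad_dec('101', -2): A returns (0, ''), B returns (0, '101')
import Mathlib
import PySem

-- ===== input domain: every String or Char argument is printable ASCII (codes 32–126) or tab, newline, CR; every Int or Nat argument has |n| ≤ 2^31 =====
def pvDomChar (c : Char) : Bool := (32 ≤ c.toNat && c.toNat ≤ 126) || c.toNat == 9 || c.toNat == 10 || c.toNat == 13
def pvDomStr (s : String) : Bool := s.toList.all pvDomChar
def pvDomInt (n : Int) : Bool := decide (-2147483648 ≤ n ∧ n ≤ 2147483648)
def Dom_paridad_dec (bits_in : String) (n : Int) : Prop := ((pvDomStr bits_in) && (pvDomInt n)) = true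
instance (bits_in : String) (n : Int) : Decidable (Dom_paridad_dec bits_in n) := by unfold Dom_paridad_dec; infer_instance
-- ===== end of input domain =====

-- B replaces A's block-slicing loop over range(0,len,n) by one streaming pass with a
-- running block sum and position counter (objective: simpler).

-- ===== PORT A =====
def paridad_dec (bits_in : String) (n : Int) : Int × String :=
  -- x = [int(k) for k in bits_in]   (int(k) raises on non-digit chars: excluded by Pre_)
  let x : List Int := bits_in.toList.map (fun k => (PySem.Int.ofStr? (String.ofList [k])).getD 0)
  -- for i in range(0, len(x), n): …  (n = 0 raises ValueError: excluded by Pre_)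
  let r := (PySem.List.pyRange 0 (x.length : Int) n).foldl
    (fun (st : Int × List Int) i =>
      let er := if PySem.Int.mod (PySem.List.slice x (some i) (some (i + n))).sum 2 ≠ 0
                then st.1 + 1 else st.1
      (er, st.2 ++ PySem.List.slice x (some i) (some (i + n - 1)))) (0, [])
  (r.1, PySem.Str.join "" (r.2.map PySem.Int.toStr))

-- ===== PORT B =====
-- the for-loop of Source B over the characters, state (err, s, c, out)
def pdAltGo (n : Int) : List Char → Int → Int → Int → List Char → Int × List Char
  | [], err, s, c, out => (if 0 < c ∧ PySem.Int.mod s 2 ≠ 0 then err + 1 else err, out)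
  | ch :: rest, err, s, c, out =>
    let b := (PySem.Int.ofStr? (String.ofList [ch])).getD 0
    let out' := if c ≠ n - 1 then out ++ [ch] else out
    let s' := s + b
    let c' := c + 1
    if c' = n then
      pdAltGo n rest (if PySem.Int.mod s' 2 ≠ 0 then err + 1 else err) 0 0 out'
    else
      pdAltGo n rest err s' c' out'

def paridad_dec_alt (bits_in : String) (n : Int) : Int × String :=
  let r := pdAltGo n bits_in.toList 0 0 0 []
  (r.1, String.ofList r.2)   -- "".join(out): out holds single characters

-- ===== PRECONDITION & SPEC =====
-- Pre_ excludes: non-digit characters and n = 0, where A raises (ValueError); and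
-- negative n on nonempty input, where A's (0, '') is an artefact of Python's empty
-- range(0, len, n<0) while B's streaming loop treats the string as one open block.
def Pre_paridad_dec (bits_in : String) (n : Int) : Prop :=
  bits_in.toList.all Char.isDigit = true ∧ (1 ≤ n ∨ (bits_in = "" ∧ n ≠ 0))
instance (bits_in : String) (n : Int) : Decidable (Pre_paridad_dec bits_in n) := by
  unfold Pre_paridad_dec; infer_instance

def pvWitness_paridad_dec : String × Int := ("1011", 3)

def Spec_paridad_dec (bits_in : String) (n : Int) (out : Int × String) : Prop :=
  out = paridad_dec_alt bits_in n
instance (bits_in : String) (n : Int) (out : Int × String) : Decidable (Spec_paridad_dec bits_in n out) := by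
  unfold Spec_paridad_dec; infer_instance

-- ===== CLAIM (what is proved, stated in full; the proofs are below) =====
def Claim_equal_paridad_dec : Prop :=
  ∀ (bits_in : String) (n : Int), Dom_paridad_dec bits_in n →
    Pre_paridad_dec bits_in n → Spec_paridad_dec bits_in n (paridad_dec bits_in n)

-- ===== LEMMAS AND PROOFS =====

-- int(k) for a single character k
def pvDig (c : Char) : Int := (PySem.Int.ofStr? (String.ofList [c])).getD 0

-- block-recursive common form: block size m+1, per block count parity and keep the
-- first m characters
def pvBlocks (m : Nat) : List Char → Int × List Char
  | [] => (0, [])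
  | c :: cs =>
    let r := pvBlocks m ((c :: cs).drop (m + 1))
    ((if PySem.Int.mod (((c :: cs).take (m + 1)).map pvDig).sum 2 ≠ 0 then 1 else 0) + r.1,
      (c :: cs).take m ++ r.2)
  termination_by cs => cs.length
  decreasing_by simp

theorem pvBlocks_nil (m : Nat) : pvBlocks m [] = (0, []) := by unfold pvBlocks; rfl

theorem pvBlocks_cons (m : Nat) (c : Char) (cs : List Char) :
    pvBlocks m (c :: cs) =
      ((if PySem.Int.mod (((c :: cs).take (m + 1)).map pvDig).sum 2 ≠ 0 then 1 else 0)
          + (pvBlocks m ((c :: cs).drop (m + 1))).1,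
        (c :: cs).take m ++ (pvBlocks m ((c :: cs).drop (m + 1))).2) := by
  conv_lhs => rw [pvBlocks]

-- range(0, L, n) for 0 < n: empty below zero, else peel the first block index
theorem pvRange_nil (n L : Int) (hn : 0 < n) (hL : L ≤ 0) :
    PySem.List.pyRange 0 L n = [] := by
  rw [PySem.List.pyRange_of_pos _ _ hn, if_neg (by omega)]
  simp

theorem pvRange_cons (L n : Int) (hn : 0 < n) (hL : 0 < L) :
    PySem.List.pyRange 0 L n = 0 :: (PySem.List.pyRange 0 (L - n) n).map (· + n) := by
  rw [PySem.List.pyRange_of_pos _ _ hn, PySem.List.pyRange_of_pos _ _ hn, if_pos hL]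
  have hq0 : 0 ≤ (L - 1) / n := Int.ediv_nonneg (by omega) (by omega)
  have hdiv : (L - 0 + n - 1) / n = (L - 1) / n + 1 := by
    have h := Int.add_mul_ediv_right (L - 1) 1 (show n ≠ 0 by omega)
    rw [one_mul] at h
    rw [show L - 0 + n - 1 = L - 1 + n by ring, h]
  have hC1 : ((L - 0 + n - 1) / n).toNat = ((L - 1) / n).toNat + 1 := by omega
  rw [hC1, List.range_succ_eq_map]
  simp only [List.map_cons, List.map_map]
  congr 1
  · norm_num
  · by_cases hLn : 0 < L - n
    · rw [if_pos hLn, show L - n - 0 + n - 1 = L - 1 by ring]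
      have hfun : ((fun k : Nat => 0 + n * (k : Int)) ∘ Nat.succ)
          = ((· + n) ∘ (fun k : Nat => 0 + n * (k : Int))) := by
        funext k; simp [Function.comp]; ring
      rw [hfun]
    · rw [if_neg hLn]
      have h0 : (L - 1) / n = 0 := Int.ediv_eq_zero_of_lt (by omega) (by omega)
      rw [h0]
      simp

-- A's loop over range(0, len, n), with generalized accumulator, equals the block recursion
theorem pvA_fold (m : Nat) (n : Int) (hn : n = (m : Int) + 1) :
    ∀ (L : Nat) (cs : List Char), cs.length = L → ∀ (e : Int) (y : List Int),
    (PySem.List.pyRange 0 (cs.length : Int) n).foldl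
      (fun (st : Int × List Int) i =>
        let er := if PySem.Int.mod (PySem.List.slice (cs.map pvDig) (some i) (some (i + n))).sum 2 ≠ 0
                  then st.1 + 1 else st.1
        (er, st.2 ++ PySem.List.slice (cs.map pvDig) (some i) (some (i + n - 1)))) (e, y)
    = (e + (pvBlocks m cs).1, y ++ ((pvBlocks m cs).2).map pvDig) := by
  intro L
  induction L using Nat.strong_induction_on with
  | _ L IH =>
    intro cs hL e y
    cases cs with
    | nil =>
      rw [show ((([] : List Char).length : Int)) = 0 by simp, pvRange_nil n 0 (by omega) le_rfl]
      simp [pvBlocks_nil]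
    | cons ch rest =>
      have hn0 : 0 < n := by omega
      have hL1 : 0 < (((ch :: rest).length : Int)) := by
        simp
      rw [pvRange_cons _ n hn0 hL1, List.foldl_cons]
      simp only []
      -- the head block: indices 0 .. n-1
      have hslh1 : PySem.List.slice ((ch :: rest).map pvDig) (some 0) (some (0 + n))
          = ((ch :: rest).take (m + 1)).map pvDig := by
        rw [zero_add, PySem.List.slice_toNat _ le_rfl (by omega), List.map_take]
        congr 1
        omega
      have hslh2 : PySem.List.slice ((ch :: rest).map pvDig) (some 0) (some (0 + n - 1))
          = ((ch :: rest).take m).map pvDig := by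
        rw [zero_add, PySem.List.slice_toNat _ le_rfl (by omega), List.map_take]
        congr 1
        omega
      rw [hslh1, hslh2, List.foldl_map]
      -- the remaining blocks act on the dropped list
      rw [PySem.List.foldl_congr_mem _ _
        (fun (st : Int × List Int) i =>
          let er := if PySem.Int.mod (PySem.List.slice (((ch :: rest).drop (m + 1)).map pvDig)
                        (some i) (some (i + n))).sum 2 ≠ 0
                    then st.1 + 1 else st.1
          (er, st.2 ++ PySem.List.slice (((ch :: rest).drop (m + 1)).map pvDig)
                        (some i) (some (i + n - 1)))) _
        (by
          intro acc i hi
          have hi0 : 0 ≤ i := ((PySem.List.mem_pyRange_iff_of_pos hn0 i).1 hi).1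
          have hs1 : PySem.List.slice ((ch :: rest).map pvDig) (some (i + n)) (some (i + n + n))
              = PySem.List.slice (((ch :: rest).drop (m + 1)).map pvDig) (some i) (some (i + n)) := by
            rw [PySem.List.slice_toNat _ (by omega) (by omega),
              PySem.List.slice_toNat _ (by omega) (by omega)]
            simp only [← List.map_drop, List.drop_drop]
            rw [show ((i + n + n).toNat - (i + n).toNat) = ((i + n).toNat - i.toNat) from by omega,
              show (i + n).toNat = m + 1 + i.toNat from by omega]
          have hs2 : PySem.List.slice ((ch :: rest).map pvDig) (some (i + n)) (some (i + n + n - 1))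
              = PySem.List.slice (((ch :: rest).drop (m + 1)).map pvDig) (some i) (some (i + n - 1)) := by
            rw [PySem.List.slice_toNat _ (by omega) (by omega),
              PySem.List.slice_toNat _ (by omega) (by omega)]
            simp only [← List.map_drop, List.drop_drop]
            rw [show ((i + n + n - 1).toNat - (i + n).toNat) = ((i + n - 1).toNat - i.toNat) from by omega,
              show (i + n).toNat = m + 1 + i.toNat from by omega]
          simp only []
          rw [show i + n + n = i + n + n from rfl]
          rw [hs1, hs2])]
      have hrange : PySem.List.pyRange 0 ((((ch :: rest).length : Int)) - n) n
          = PySem.List.pyRange 0 ((((ch :: rest).drop (m + 1)).length : Int)) n := by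
        by_cases hge : m + 1 ≤ (ch :: rest).length
        · congr 1
          rw [List.length_drop]
          omega
        · have hlc : (ch :: rest).length = rest.length + 1 := by simp
          rw [List.drop_eq_nil_of_le (by omega)]
          rw [pvRange_nil n _ hn0 (by push_cast [hlc]; omega),
            pvRange_nil n _ hn0 (by simp)]
      rw [hrange,
        IH ((ch :: rest).drop (m + 1)).length
          (by
            rw [List.length_drop]
            have hL2 : rest.length + 1 = L := by simpa using hL
            simp [List.length_cons]
            omega) _ rfl]
      rw [pvBlocks_cons]
      simp only [Prod.mk.injEq]
      constructor
      · split_ifs <;> ring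
      · rw [List.map_append, List.append_assoc]

-- one streaming step-sequence: from counter c inside a block to the next block
-- boundary (or the final flush)
theorem pdAltGo_step (n : Int) (cs : List Char) :
    ∀ (c : Int), 0 ≤ c → c < n → ∀ (err s : Int) (out : List Char),
    pdAltGo n cs err s c out =
      if (cs.length : Int) < n - c then
        (if 0 < c + cs.length ∧ PySem.Int.mod (s + (cs.map pvDig).sum) 2 ≠ 0 then err + 1 else err,
          out ++ cs)
      else
        pdAltGo n (cs.drop (n - c).toNat)
          (if PySem.Int.mod (s + ((cs.take (n - c).toNat).map pvDig).sum) 2 ≠ 0 then err + 1 else err)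
          0 0 (out ++ cs.take (n - c - 1).toNat) := by
  induction cs with
  | nil =>
    intro c hc0 hcn err s out
    rw [pdAltGo, if_pos (show ((([] : List Char).length : Int)) < n - c by simp; omega)]
    simp
  | cons ch rest ih =>
    intro c hc0 hcn err s out
    have hlc : (((ch :: rest).length : Int)) = (rest.length : Int) + 1 := by
      push_cast [List.length_cons]; ring
    by_cases hend : c + 1 = n
    · rw [if_neg (show ¬ (((ch :: rest).length : Int)) < n - c by rw [hlc]; omega)]
      rw [pdAltGo, if_neg (show ¬ (c ≠ n - 1) by omega), if_pos hend]
      have h1 : (n - c).toNat = 1 := by omega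
      have h0 : (n - c - 1).toNat = 0 := by omega
      rw [h1, h0]
      simp [pvDig]
    · have hcn' : c + 1 < n := by omega
      rw [pdAltGo, if_pos (show c ≠ n - 1 by omega), if_neg hend]
      rw [ih (c + 1) (by omega) hcn' err (s + (PySem.Int.ofStr? (String.ofList [ch])).getD 0)
        (out ++ [ch])]
      by_cases hlen : ((rest.length : Int)) < n - (c + 1)
      · rw [if_pos hlen, if_pos (show (((ch :: rest).length : Int)) < n - c by rw [hlc]; omega)]
        have e1 : s + (PySem.Int.ofStr? (String.ofList [ch])).getD 0 + (rest.map pvDig).sum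
            = s + ((ch :: rest).map pvDig).sum := by
          simp [pvDig]; ring
        have hA : (0 < c + 1 + (rest.length : Int) ∧
              PySem.Int.mod (s + (PySem.Int.ofStr? (String.ofList [ch])).getD 0 + (rest.map pvDig).sum) 2 ≠ 0)
            ↔ (0 < c + (((ch :: rest).length : Int)) ∧
              PySem.Int.mod (s + ((ch :: rest).map pvDig).sum) 2 ≠ 0) := by
          rw [e1, hlc]
          constructor <;> (rintro ⟨h1, h2⟩; exact ⟨by omega, h2⟩)
        rw [if_congr hA rfl rfl]
        simp
      · rw [if_neg hlen, if_neg (show ¬ (((ch :: rest).length : Int)) < n - c by rw [hlc]; omega)]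
        have hstep : (n - c).toNat = (n - (c + 1)).toNat + 1 := by omega
        have hd : rest.drop (n - (c + 1)).toNat = (ch :: rest).drop (n - c).toNat := by
          rw [hstep, List.drop_succ_cons]
        have hsum : s + (PySem.Int.ofStr? (String.ofList [ch])).getD 0
              + ((rest.take (n - (c + 1)).toNat).map pvDig).sum
            = s + (((ch :: rest).take (n - c).toNat).map pvDig).sum := by
          rw [hstep, List.take_succ_cons]
          simp [pvDig]; ring
        have hkp : (out ++ [ch]) ++ rest.take (n - (c + 1) - 1).toNat
            = out ++ (ch :: rest).take (n - c - 1).toNat := by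
          have h2 : (n - c - 1).toNat = (n - (c + 1) - 1).toNat + 1 := by omega
          rw [h2, List.take_succ_cons, List.append_assoc]
          rfl
        rw [hd, hsum, hkp]

theorem pvB_eq_blocks (m : Nat) (cs : List Char) (n : Int) (hn : n = (m : Int) + 1)
    (err : Int) (out : List Char) :
    pdAltGo n cs err 0 0 out = (err + (pvBlocks m cs).1, out ++ (pvBlocks m cs).2) := by
  suffices H : ∀ (L : Nat) (cs : List Char), cs.length = L → ∀ (err : Int) (out : List Char),
      pdAltGo n cs err 0 0 out = (err + (pvBlocks m cs).1, out ++ (pvBlocks m cs).2) from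
    H cs.length cs rfl err out
  intro L
  induction L using Nat.strong_induction_on with
  | _ L IH =>
    intro cs hL err out
    cases cs with
    | nil => simp [pdAltGo, pvBlocks_nil]
    | cons ch rest =>
      have hL' : rest.length + 1 = L := by simpa using hL
      have hn0 : 0 < n := by omega
      rw [pdAltGo_step n (ch :: rest) 0 le_rfl hn0 err 0 out]
      have hlc : (((ch :: rest).length : Int)) = (rest.length : Int) + 1 := by
        push_cast [List.length_cons]; ring
      by_cases hlen : (((ch :: rest).length : Int)) < n - 0
      · rw [if_pos hlen]
        have hle : (ch :: rest).length ≤ m := by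
          rw [hlc] at hlen; simp [List.length_cons]; omega
        rw [pvBlocks_cons, List.drop_eq_nil_of_le (by omega), pvBlocks_nil,
          List.take_of_length_le (by omega), List.take_of_length_le hle]
        have hpos : 0 < (0 : Int) + (((ch :: rest).length : Int)) := by rw [hlc]; omega
        simp only [Prod.mk.injEq]
        constructor
        · rw [if_congr (and_iff_right hpos) rfl rfl]
          simp only [zero_add]
          split_ifs <;> ring
        · simp
      · rw [if_neg hlen]
        have hN : (n - 0).toNat = m + 1 := by omega
        have hN1 : (n - 0 - 1).toNat = m := by omega
        rw [hN, hN1]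
        rw [IH ((ch :: rest).drop (m + 1)).length
          (by rw [List.length_drop]; simp [List.length_cons]; omega) _ rfl]
        rw [pvBlocks_cons]
        simp only [Prod.mk.injEq]
        constructor
        · simp only [zero_add]
          split_ifs <;> ring
        · rw [List.append_assoc]

-- every kept character comes from the input
theorem pvBlocks_sub (m : Nat) (cs : List Char) : ∀ c ∈ (pvBlocks m cs).2, c ∈ cs := by
  induction cs using pvBlocks.induct m with
  | case1 => simp [pvBlocks_nil]
  | case2 ch rest ih =>
    intro c hc
    rw [pvBlocks_cons] at hc
    rcases List.mem_append.1 hc with h | h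
    · exact List.mem_of_mem_take h
    · exact List.mem_of_mem_drop (ih c h)

-- str(int(c)) is c again for a digit character c
theorem pvDigit_toChars (c : Char) (h : c.isDigit = true) :
    PySem.Int.toChars (pvDig c) = [c] := by
  have h1 : 48 ≤ c.toNat ∧ c.toNat ≤ 57 := by simp [Char.isDigit] at h; exact ⟨h.1, h.2⟩
  have hc : c = Char.ofNat c.toNat := (Char.ofNat_toNat c).symm
  rw [pvDig, hc]
  obtain ⟨hlo, hhi⟩ := h1
  generalize c.toNat = k at hlo hhi
  interval_cases k <;> decide

-- "".join(str(k) for k in map(int, l)) rebuilds the digit string l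
theorem pvJoin_digits (l : List Char) (h : ∀ c ∈ l, c.isDigit = true) :
    PySem.Str.join "" ((l.map pvDig).map PySem.Int.toStr) = String.ofList l := by
  apply String.ext
  rw [PySem.Str.toList_join]
  have hmap : ((l.map pvDig).map PySem.Int.toStr).map String.toList
      = l.map (fun c => [c]) := by
    simp only [List.map_map]
    refine List.map_congr_left ?_
    intro c hc
    simp only [Function.comp]
    rw [PySem.Int.toList_toStr, pvDigit_toChars c (h c hc)]
  rw [hmap]
  have hsep : ("" : String).toList = [] := rfl
  rw [hsep, PySem.Chars.join_nil_singletons]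
  simp

theorem pvRange_zero_stop (n : Int) : PySem.List.pyRange 0 0 n = [] := by
  unfold PySem.List.pyRange
  norm_num

-- ===== VERDICT (by name: the statement is the Claim_ definition above) =====
theorem paridad_dec_spec : Claim_equal_paridad_dec := by
  intro bits n hdom hpre
  unfold Spec_paridad_dec
  rcases hpre with ⟨hdig, hn1 | ⟨hempty, hn0⟩⟩
  · -- n ≥ 1
    have hm : n = (((n - 1).toNat : Nat) : Int) + 1 := by omega
    unfold paridad_dec paridad_dec_alt
    simp only []
    have hx : (fun k : Char => (PySem.Int.ofStr? (String.ofList [k])).getD 0) = pvDig := rfl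
    rw [hx, List.length_map]
    rw [pvA_fold (n - 1).toNat n hm bits.toList.length bits.toList rfl 0 []]
    rw [pvB_eq_blocks (n - 1).toNat bits.toList n hm 0 []]
    simp only [zero_add, List.nil_append]
    refine Prod.ext rfl ?_
    refine pvJoin_digits _ ?_
    intro c hc
    have hmem := pvBlocks_sub (n - 1).toNat bits.toList c hc
    exact (List.all_eq_true.1 hdig) c hmem
  · -- bits = "" (and n ≠ 0): both sides are (0, "")
    subst hempty
    unfold paridad_dec paridad_dec_alt
    simp only []
    rw [show ("" : String).toList = [] from rfl]
    simp only [List.map_nil, List.length_nil, Nat.cast_zero]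
    rw [pvRange_zero_stop n]
    simp only [List.foldl_nil, List.map_nil]
    rw [pdAltGo, if_neg (by simp)]
    rfl
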